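-- pv_equiv track=rewrite | github.com/huydhoang/lunisolar-ts | data/lunisolar_v2.py | _calculate_cycle_from_stem_branch
-- ===== SOURCE A (Python) =====
-- def _calculate_cycle_from_stem_branch(stem_idx: int, branch_idx: int) -> int:
--     """Calculate 60-cycle position from stem and branch indices."""
--     # Convert to 0-based indices
--     stem_0 = stem_idx - 1
--     branch_0 = branch_idx - 1
--
--     # Find the cycle position where stem and branch align
--     for cycle in range(1, 61):
--         cycle_stem = (cycle - 1) % 10
--         cycle_branch = (cycle - 1) % 12
--         if cycle_stem == stem_0 and cycle_branch == branch_0: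
--             return cycle
--
--     # Fallback (should not happen with valid inputs)
--     return 1
-- ===== SOURCE B (Python) =====
-- def _calculate_cycle_from_stem_branch(stem_idx: int, branch_idx: int) -> int:
--     """Calculate 60-cycle position from stem and branch indices (direct CRT solve, no loop)."""
--     stem_0 = stem_idx - 1
--     branch_0 = branch_idx - 1
--     # A solution in 1..60 exists iff both indices are in range and have equal parity.
--     if 0 <= stem_0 <= 9 and 0 <= branch_0 <= 11 and (stem_0 - branch_0) % 2 == 0:
--         k = ((stem_0 - branch_0) // 2) % 6
--         return (stem_0 + 10 * k) % 60 + 1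
--     return 1
-- ===== Notes on version B (the rewrite author's own statement) =====
-- stated objective: simpler
-- what changed: Replaced the 60-iteration linear scan for the matching cycle with a direct CRT closed form: validity check (range + equal parity) then cycle = (stem_0 + 10*(((stem_0-branch_0)//2) % 6)) % 60 + 1.
import Mathlib
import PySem

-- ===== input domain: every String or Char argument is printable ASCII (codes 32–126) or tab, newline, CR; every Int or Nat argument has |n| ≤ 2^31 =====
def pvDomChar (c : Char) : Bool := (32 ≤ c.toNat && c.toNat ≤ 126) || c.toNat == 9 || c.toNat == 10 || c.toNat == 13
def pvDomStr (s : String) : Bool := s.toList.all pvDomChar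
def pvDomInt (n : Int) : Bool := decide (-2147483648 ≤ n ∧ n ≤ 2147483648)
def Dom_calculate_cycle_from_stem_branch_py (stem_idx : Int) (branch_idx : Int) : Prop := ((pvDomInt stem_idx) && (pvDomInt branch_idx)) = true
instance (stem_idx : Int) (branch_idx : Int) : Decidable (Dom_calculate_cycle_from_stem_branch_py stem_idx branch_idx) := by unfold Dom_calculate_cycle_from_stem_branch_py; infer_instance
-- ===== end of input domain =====

-- ===== PORT A =====
-- B replaces A's 60-step scan with a direct CRT closed form (validity check + formula); equivalence proved on Dom.

-- A's `for cycle in range(1, 61): ... return cycle` as a first-match recursion over the range list.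
def pvLoopA (stem_0 : Int) (branch_0 : Int) : List Int → Int
  | [] => 1  -- fallback (should not happen with valid inputs)
  | cycle :: rest =>
      if PySem.Int.mod (cycle - 1) 10 = stem_0 ∧ PySem.Int.mod (cycle - 1) 12 = branch_0 then
        cycle
      else
        pvLoopA stem_0 branch_0 rest

def calculate_cycle_from_stem_branch_py (stem_idx : Int) (branch_idx : Int) : Int :=
  pvLoopA (stem_idx - 1) (branch_idx - 1) (PySem.List.pyRange 1 61 1)

-- ===== PORT B =====
def calculate_cycle_from_stem_branch_py_alt (stem_idx : Int) (branch_idx : Int) : Int :=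
  let stem_0 := stem_idx - 1
  let branch_0 := branch_idx - 1
  if 0 ≤ stem_0 ∧ stem_0 ≤ 9 ∧ 0 ≤ branch_0 ∧ branch_0 ≤ 11 ∧ PySem.Int.mod (stem_0 - branch_0) 2 = 0 then
    PySem.Int.mod (stem_0 + 10 * PySem.Int.mod (PySem.Int.floordiv (stem_0 - branch_0) 2) 6) 60 + 1
  else
    1

-- ===== PRECONDITION & SPEC =====
def Spec_calculate_cycle_from_stem_branch_py (stem_idx : Int) (branch_idx : Int) (out : Int) : Prop := out = calculate_cycle_from_stem_branch_py_alt stem_idx branch_idx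
instance (stem_idx : Int) (branch_idx : Int) (out : Int) : Decidable (Spec_calculate_cycle_from_stem_branch_py stem_idx branch_idx out) := by unfold Spec_calculate_cycle_from_stem_branch_py; infer_instance

-- ===== CLAIM (what is proved, stated in full; the proofs are below) =====
def Claim_equal_calculate_cycle_from_stem_branch_py : Prop := ∀ (stem_idx : Int) (branch_idx : Int), Dom_calculate_cycle_from_stem_branch_py stem_idx branch_idx → Spec_calculate_cycle_from_stem_branch_py stem_idx branch_idx (calculate_cycle_from_stem_branch_py stem_idx branch_idx)

-- ===== LEMMAS AND PROOFS =====

-- If no element of the list satisfies the match condition, the scan falls through to 1.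
lemma pvLoopA_none (stem_0 branch_0 : Int) (l : List Int)
    (h : ∀ c ∈ l, ¬ (PySem.Int.mod (c - 1) 10 = stem_0 ∧ PySem.Int.mod (c - 1) 12 = branch_0)) :
    pvLoopA stem_0 branch_0 l = 1 := by
  induction l with
  | nil => rfl
  | cons c rest ih =>
      rw [pvLoopA, if_neg (h c (List.mem_cons_self ..))]
      exact ih (fun x hx => h x (List.mem_cons_of_mem _ hx))

-- Out-of-range stems/branches never match: the scan returns the fallback 1.
lemma pvLoopA_out (stem_0 branch_0 : Int)
    (h : ¬ (0 ≤ stem_0 ∧ stem_0 ≤ 9 ∧ 0 ≤ branch_0 ∧ branch_0 ≤ 11)) :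
    pvLoopA stem_0 branch_0 (PySem.List.pyRange 1 61 1) = 1 := by
  apply pvLoopA_none
  intro c _ hc
  obtain ⟨h10, h12⟩ := hc
  rw [PySem.Int.mod_eq_emod_of_pos (by norm_num : (0:Int) < 10)] at h10
  rw [PySem.Int.mod_eq_emod_of_pos (by norm_num : (0:Int) < 12)] at h12
  have g10 := Int.emod_nonneg (c - 1) (by norm_num : (10:Int) ≠ 0)
  have l10 := Int.emod_lt_of_pos (c - 1) (by norm_num : (0:Int) < 10)
  have g12 := Int.emod_nonneg (c - 1) (by norm_num : (12:Int) ≠ 0)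
  have l12 := Int.emod_lt_of_pos (c - 1) (by norm_num : (0:Int) < 12)
  omega

-- ===== VERDICT (by name: the statement is the Claim_ definition above) =====
theorem calculate_cycle_from_stem_branch_py_spec : Claim_equal_calculate_cycle_from_stem_branch_py := by
  intro stem_idx branch_idx _
  unfold Spec_calculate_cycle_from_stem_branch_py
  by_cases h : 0 ≤ stem_idx - 1 ∧ stem_idx - 1 ≤ 9 ∧ 0 ≤ branch_idx - 1 ∧ branch_idx - 1 ≤ 11
  · obtain ⟨h1, h2, h3, h4⟩ := h
    have hs : stem_idx = 1 ∨ stem_idx = 2 ∨ stem_idx = 3 ∨ stem_idx = 4 ∨ stem_idx = 5 ∨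
        stem_idx = 6 ∨ stem_idx = 7 ∨ stem_idx = 8 ∨ stem_idx = 9 ∨ stem_idx = 10 := by omega
    have hbr : branch_idx = 1 ∨ branch_idx = 2 ∨ branch_idx = 3 ∨ branch_idx = 4 ∨
        branch_idx = 5 ∨ branch_idx = 6 ∨ branch_idx = 7 ∨ branch_idx = 8 ∨ branch_idx = 9 ∨
        branch_idx = 10 ∨ branch_idx = 11 ∨ branch_idx = 12 := by omega
    rcases hs with rfl|rfl|rfl|rfl|rfl|rfl|rfl|rfl|rfl|rfl <;>
      rcases hbr with rfl|rfl|rfl|rfl|rfl|rfl|rfl|rfl|rfl|rfl|rfl|rfl <;> decide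
  · rw [calculate_cycle_from_stem_branch_py, pvLoopA_out _ _ h]
    simp only [calculate_cycle_from_stem_branch_py_alt]
    rw [if_neg (by tauto)]
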